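-- pv_equiv track=rewrite | github.com/Bluewolf787/Advent-of-Code | 2023/11/11.py | expand_cols
-- ===== SOURCE A (Python) =====
-- def expand_cols(data: list, multiplier: int):
--     new_data = []
--
--     for _ in data:
--         new_data.append('')
--
--     i = 0
--     while i + 1 <= len(data[0]):
--         valid = True
--         j = 0
--         while j + 1 <= len(data):
--             if data[j][i] == '#':
--                 valid = False
--             j += 1
--
--         if valid:
--             k = 0
--             while k + 1 <= len(data):
--                 new_data[k] += data[k][i] * multiplier
--                 k += 1
--         else:
--             k = 0
--             while k + 1 <= len(data):
--                 new_data[k] += data[k][i]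
--                 k += 1
--         i += 1
--
--     return new_data
-- ===== SOURCE B (Python) =====
-- def expand_cols(data: list, multiplier: int):
--     n = len(data[0])
--     empty = [all(row[i] != '#' for row in data) for i in range(n)]
--     return [''.join(row[i] * multiplier if empty[i] else row[i] for i in range(n))
--             for row in data]
-- ===== Notes on version B (the rewrite author's own statement) =====
-- stated objective: simpler
-- what changed: Precomputes one boolean per column (no '#' anywhere) and then builds the output row by row with a join, instead of A's column-by-column accumulation that re-scans and mutates every row string per column.
import Mathlib
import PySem

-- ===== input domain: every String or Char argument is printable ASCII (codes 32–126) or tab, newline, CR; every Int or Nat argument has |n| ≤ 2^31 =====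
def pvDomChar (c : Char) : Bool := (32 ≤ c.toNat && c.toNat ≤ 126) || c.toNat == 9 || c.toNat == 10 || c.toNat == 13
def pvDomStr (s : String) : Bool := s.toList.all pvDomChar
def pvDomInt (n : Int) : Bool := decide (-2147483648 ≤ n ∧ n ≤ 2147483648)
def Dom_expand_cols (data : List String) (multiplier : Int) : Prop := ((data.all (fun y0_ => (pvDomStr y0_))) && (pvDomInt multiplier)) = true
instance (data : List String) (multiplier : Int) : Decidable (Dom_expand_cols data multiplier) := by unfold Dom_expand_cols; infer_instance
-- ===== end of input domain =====

-- B precomputes one boolean per column and builds the result row by row with a join,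
-- instead of A's column-by-column accumulation; same cost, simpler decomposition.

-- data[k][i] for a nonneg index i (Pre_ guarantees i is in range); default ' ' is never read under Pre_
def pvChAt (row : List Char) (i : Nat) : Char := row.getD i ' '

-- Python `c * multiplier` (negative multiplier yields '')
def pvRep (c : Char) (m : Int) : List Char := List.replicate m.toNat c

-- ===== PORT A =====
def expand_cols (data : List String) (multiplier : Int) : List String :=
  let rows := data.map String.toList
  let n := (rows.headD []).length          -- len(data[0]); Pre_ excludes empty data
  let newData :=
    (List.range n).foldl (fun acc i =>
      let valid := rows.foldl (fun v row => if pvChAt row i = '#' then false else v) true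
      if valid then
        List.zipWith (fun nd row => nd ++ pvRep (pvChAt row i) multiplier) acc rows
      else
        List.zipWith (fun nd row => nd ++ [pvChAt row i]) acc rows)
      (rows.map (fun _ => ([] : List Char)))
  newData.map String.mk

-- ===== PORT B =====
def expand_cols_alt (data : List String) (multiplier : Int) : List String :=
  let rows := data.map String.toList
  let n := (rows.headD []).length
  let empty := (List.range n).map (fun i => rows.all (fun row => pvChAt row i ≠ '#'))
  rows.map (fun row => String.mk ((List.range n).flatMap (fun i =>
    if empty.getD i true then pvRep (pvChAt row i) multiplier else [pvChAt row i])))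

-- ===== PRECONDITION & SPEC =====
-- A raises IndexError on empty data (data[0]) and on rows shorter than the first row
def Pre_expand_cols (data : List String) (multiplier : Int) : Prop :=
  data ≠ [] ∧ ∀ s ∈ data, (data.headD "").toList.length ≤ s.toList.length
instance (data : List String) (multiplier : Int) : Decidable (Pre_expand_cols data multiplier) := by
  unfold Pre_expand_cols; infer_instance
def pvWitness_expand_cols : List String × Int := (["#.", ".."], 2)

def Spec_expand_cols (data : List String) (multiplier : Int) (out : List String) : Prop := out = expand_cols_alt data multiplier
instance (data : List String) (multiplier : Int) (out : List String) : Decidable (Spec_expand_cols data multiplier out) := by unfold Spec_expand_cols; infer_instance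

-- ===== CLAIM (what is proved, stated in full; the proofs are below) =====
def Claim_equal_expand_cols : Prop := ∀ (data : List String) (multiplier : Int), Dom_expand_cols data multiplier → Pre_expand_cols data multiplier → Spec_expand_cols data multiplier (expand_cols data multiplier)

-- ===== LEMMAS AND PROOFS =====

theorem pv_zipWith_map_left {α β : Type} (f : α → β) (g : β → α → β) (l : List α) :
    List.zipWith g (l.map f) l = l.map (fun x => g (f x) x) := by
  induction l with
  | nil => rfl
  | cons a t ih => simp [ih]

theorem pv_valid_fold (rows : List (List Char)) (i : Nat) (b : Bool) :
    rows.foldl (fun v row => if pvChAt row i = '#' then false else v) b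
      = (b && rows.all (fun row => pvChAt row i ≠ '#')) := by
  induction rows generalizing b with
  | nil => simp
  | cons r t ih =>
    simp only [List.foldl_cons, List.all_cons, ih]
    by_cases h : pvChAt r i = '#' <;> simp [h]

-- A's fold keeps the invariant: the accumulator is rows.map of a per-row word
theorem pv_A_fold (rows : List (List Char)) (m : Int) (idxs : List Nat)
    (f : List Char → List Char) :
    idxs.foldl (fun acc i =>
      if rows.all (fun r => pvChAt r i ≠ '#') then
        List.zipWith (fun nd row => nd ++ pvRep (pvChAt row i) m) acc rows
      else
        List.zipWith (fun nd row => nd ++ [pvChAt row i]) acc rows)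
      (rows.map f)
    = rows.map (fun row => f row ++ idxs.flatMap (fun i =>
        if rows.all (fun r => pvChAt r i ≠ '#') then pvRep (pvChAt row i) m
        else [pvChAt row i])) := by
  induction idxs generalizing f with
  | nil => simp
  | cons i t ih =>
    simp only [List.foldl_cons, List.flatMap_cons]
    by_cases h : rows.all (fun r => pvChAt r i ≠ '#')
    · rw [if_pos h, pv_zipWith_map_left]
      rw [ih (fun row => f row ++ pvRep (pvChAt row i) m)]
      simp only [h, if_true, List.append_assoc]
    · rw [if_neg h, pv_zipWith_map_left]
      rw [ih (fun row => f row ++ [pvChAt row i])]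
      rw [Bool.not_eq_true] at h
      simp only [h, Bool.false_eq_true, if_false, List.append_assoc]

theorem pv_empty_getD (rows : List (List Char)) (n i : Nat) (hi : i < n) :
    ((List.range n).map (fun j => rows.all (fun row => decide (pvChAt row j ≠ '#')))).getD i true
      = rows.all (fun row => decide (pvChAt row i ≠ '#')) := by
  rw [List.getD_eq_getElem?_getD, List.getElem?_map]
  simp [List.getElem?_range hi]

-- ===== VERDICT (by name: the statement is the Claim_ definition above) =====
theorem expand_cols_spec : Claim_equal_expand_cols := by
  intro data multiplier _ _
  simp only [Spec_expand_cols, expand_cols, expand_cols_alt, pv_valid_fold, Bool.true_and]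
  rw [pv_A_fold (data.map String.toList) multiplier (List.range ((data.map String.toList).headD []).length) (fun _ => [])]
  rw [List.map_map]
  refine List.map_congr_left ?_
  intro row _
  refine congrArg String.mk ?_
  simp only [List.nil_append]
  refine List.flatMap_congr ?_
  intro i hi
  rw [pv_empty_getD _ _ _ (List.mem_range.mp hi)]
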